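-- pv_equiv track=rewrite | github.com/GrebVl/python_lesson_09 | task_2.2/task_2_2.py | diff_nums
-- ===== SOURCE A (Python) =====
-- def diff_nums(num_list):
--     if num_list == None:
--         return None
--     elif len(num_list) > 0:
--         diff_n = num_list[0]
--         for i in range(1, len(num_list)):
--             diff_n -= num_list[i]
--     else:
--         diff_n = num_list[0]
--     return diff_n
-- ===== SOURCE B (Python) =====
-- def diff_nums(num_list):
--     if num_list == None:
--         return None
--     # x0 - x1 - ... - xn  ==  2*x0 - (x0 + x1 + ... + xn)
--     return 2 * num_list[0] - sum(num_list)
-- ===== Notes on version B (the rewrite author's own statement) =====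
-- stated objective: simpler
-- what changed: Replaces the index loop of repeated subtractions by the closed-form identity 2*first - sum(whole list): one builtin sum over the entire list (first element included) plus a doubling, instead of subtracting the tail elements one by one.
import Mathlib
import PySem

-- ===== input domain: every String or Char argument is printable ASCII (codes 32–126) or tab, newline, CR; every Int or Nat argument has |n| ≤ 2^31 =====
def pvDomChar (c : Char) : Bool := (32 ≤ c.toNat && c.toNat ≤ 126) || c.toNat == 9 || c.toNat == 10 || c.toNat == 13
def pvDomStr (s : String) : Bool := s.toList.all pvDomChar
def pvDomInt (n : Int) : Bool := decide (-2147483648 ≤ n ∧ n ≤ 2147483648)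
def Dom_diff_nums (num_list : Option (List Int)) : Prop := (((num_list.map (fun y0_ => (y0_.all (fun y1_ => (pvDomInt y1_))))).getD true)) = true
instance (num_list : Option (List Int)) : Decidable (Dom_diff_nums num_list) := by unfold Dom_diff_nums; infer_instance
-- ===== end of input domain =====

-- B replaces A's index loop of repeated subtractions by the closed-form identity 2*first - sum(whole list); simpler, same cost.

-- ===== PORT A =====
def diff_nums (num_list : Option (List Int)) : Option Int :=
  match num_list with
  | none => none
  | some xs =>
    if xs.length > 0 then
      -- diff_n = num_list[0]; for i in range(1, len): diff_n -= num_list[i]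
      some ((PySem.List.pyRange 1 xs.length 1).foldl
        (fun d i => d - PySem.List.pyGetD xs i 0) (PySem.List.pyGetD xs 0 0))
    else
      PySem.List.pyGet? xs 0  -- num_list[0] on empty list: IndexError (excluded by Pre_)

-- ===== PORT B =====
def diff_nums_alt (num_list : Option (List Int)) : Option Int :=
  match num_list with
  | none => none
  | some xs =>
    -- 2 * num_list[0] - sum(num_list)
    (PySem.List.pyGet? xs 0).map (fun h => 2 * h - xs.sum)

-- ===== PRECONDITION & SPEC =====
-- Pre_ excludes only the empty list, on which both A and B raise IndexError.
def Pre_diff_nums (num_list : Option (List Int)) : Prop := num_list ≠ some []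
instance (num_list : Option (List Int)) : Decidable (Pre_diff_nums num_list) := by unfold Pre_diff_nums; infer_instance
def pvWitness_diff_nums : Option (List Int) := some [10, 1, 2]

def Spec_diff_nums (num_list : Option (List Int)) (out : Option Int) : Prop := out = diff_nums_alt num_list
instance (num_list : Option (List Int)) (out : Option Int) : Decidable (Spec_diff_nums num_list out) := by unfold Spec_diff_nums; infer_instance

-- ===== CLAIM (what is proved, stated in full; the proofs are below) =====
def Claim_equal_diff_nums : Prop := ∀ (num_list : Option (List Int)), Dom_diff_nums num_list → Pre_diff_nums num_list → Spec_diff_nums num_list (diff_nums num_list)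

-- ===== LEMMAS AND PROOFS =====
theorem foldl_sub_eq_sub_sum (l : List Int) (a : Int) :
    l.foldl (fun d v => d - v) a = a - l.sum := by
  induction l generalizing a with
  | nil => simp
  | cons x t ih => simp [List.foldl, ih]; ring

-- ===== VERDICT (by name: the statement is the Claim_ definition above) =====
theorem diff_nums_spec : Claim_equal_diff_nums := by
  intro num_list _ hpre
  unfold Spec_diff_nums diff_nums diff_nums_alt
  match num_list with
  | none => rfl
  | some xs =>
    match xs with
    | [] => exact absurd rfl hpre
    | x :: t =>
      simp only [List.length_cons]
      rw [if_pos (by omega)]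
      have hfold := PySem.List.foldl_pyRange_pyGetD (xs := x :: t)
        (f := fun d v => d - v) (a := (1 : Int)) (d := 0)
        (init := PySem.List.pyGetD (x :: t) 0 0) (by omega)
      have hlen : PySem.List.len (x :: t) = ((t.length + 1 : Nat) : Int) := by
        simp [PySem.List.len]
      rw [hlen] at hfold
      rw [hfold, foldl_sub_eq_sub_sum]
      simp [pysem]
      ring
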